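-- pv_equiv track=rewrite | github.com/EthanFeld/TerKet | src/terket/probability_native.py | _estimate_factor_table_elimination_work
-- ===== SOURCE A (Python) =====
-- def _estimate_factor_table_elimination_work(
--     factor_scopes: tuple[tuple[int, ...], ...],
--     order: list[int],
-- ) -> int:
--     """Cheap work proxy mirroring TerKet's generic factor-table elimination."""
--     factors = {tuple(scope) for scope in factor_scopes if scope}
--     work = 0
--
--     for var in order:
--         bucket_scopes = [scope for scope in factors if var in scope]
--         if not bucket_scopes:
--             work += 1
--             continue
--
--         for scope in bucket_scopes:
--             factors.remove(scope)
--         union_scope = tuple(sorted({vertex for scope in bucket_scopes for vertex in scope}))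
--         new_scope = tuple(vertex for vertex in union_scope if vertex != var)
--         work += len(bucket_scopes) * (1 << len(union_scope))
--         if new_scope:
--             factors.add(new_scope)
--
--     return work
-- ===== SOURCE B (Python) =====
-- def _estimate_factor_table_elimination_work(
--     factor_scopes,
--     order,
-- ):
--     """Same work proxy, but with a variable->scopes index maintained incrementally
--     (lazy deletion) instead of rescanning every factor for every variable."""
--     factors = set()
--     index = {}
--     for scope in factor_scopes:
--         t = tuple(scope)
--         if t and t not in factors:
--             factors.add(t)
--             for v in set(t):
--                 index.setdefault(v, []).append(t)
--     work = 0
--     for var in order: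
--         bucket = {t for t in index.get(var, ()) if t in factors}
--         if not bucket:
--             work += 1
--             continue
--         factors -= bucket
--         union = set().union(*bucket)
--         work += len(bucket) * (1 << len(union))
--         union.discard(var)
--         if union:
--             new_scope = tuple(sorted(union))
--             if new_scope not in factors:
--                 factors.add(new_scope)
--                 for v in new_scope:
--                     index.setdefault(v, []).append(new_scope)
--     return work
-- ===== Notes on version B (the rewrite author's own statement) =====
-- stated objective: faster
-- what changed: Replaces the per-variable rescan of the whole live factor set with a variable-to-scopes index built once and kept up to date incrementally (lazy deletion), so each elimination step only touches the scopes actually containing that variable.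
import Mathlib
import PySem

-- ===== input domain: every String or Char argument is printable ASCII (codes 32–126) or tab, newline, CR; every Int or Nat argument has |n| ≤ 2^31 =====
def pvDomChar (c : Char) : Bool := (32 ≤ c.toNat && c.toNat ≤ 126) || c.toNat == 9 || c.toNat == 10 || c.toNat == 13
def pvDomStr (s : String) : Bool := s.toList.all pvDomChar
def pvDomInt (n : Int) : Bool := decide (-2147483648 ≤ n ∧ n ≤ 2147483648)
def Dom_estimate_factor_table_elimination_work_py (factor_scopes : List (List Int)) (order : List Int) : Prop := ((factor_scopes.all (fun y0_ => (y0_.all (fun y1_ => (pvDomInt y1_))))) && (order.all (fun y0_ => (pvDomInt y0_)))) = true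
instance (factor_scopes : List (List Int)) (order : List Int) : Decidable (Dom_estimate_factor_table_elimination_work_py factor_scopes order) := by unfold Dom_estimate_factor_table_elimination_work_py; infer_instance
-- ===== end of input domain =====

-- B replaces A's per-variable rescan of all live factors with a variable→scopes index
-- maintained incrementally (lazy deletion); same return value, measurably faster on large inputs.

-- ===== PORT A =====
-- one iteration of A's `for var in order` loop; state = (factors, work).
-- `factors.remove(scope)` never raises here (every scope of bucket_scopes is in factors),
-- so it is ported as Set.discard, which equals removal on a present element.
def pyA_step (st : PySem.Set (List Int) × Int) (var : Int) : PySem.Set (List Int) × Int :=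
  let factors := st.1
  let work := st.2
  let bucket_scopes := factors.filter (fun scope => scope.contains var)
  if bucket_scopes.isEmpty then (factors, work + 1)
  else
    let factors1 := bucket_scopes.foldl (fun f s => PySem.Set.discard f s) factors
    let union_scope : List Int :=
      PySem.List.sorted (PySem.Set.ofList (bucket_scopes.flatMap (fun s => s))) (fun x => x) false
    let new_scope := union_scope.filter (fun vertex => vertex != var)
    let work1 := work + bucket_scopes.length * (2 : Int) ^ union_scope.length
    if new_scope.isEmpty then (factors1, work1) else (PySem.Set.add factors1 new_scope, work1)

def estimate_factor_table_elimination_work_py (factor_scopes : List (List Int)) (order : List Int) : Int :=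
  let factors : PySem.Set (List Int) :=
    PySem.Set.ofList (factor_scopes.filter (fun scope => !scope.isEmpty))
  (order.foldl pyA_step (factors, 0)).2

-- ===== PORT B =====
-- `for v in vs: index.setdefault(v, []).append(t)`
def pyB_index_add (index : PySem.Dict Int (List (List Int))) (t : List Int) (vs : List Int) :
    PySem.Dict Int (List (List Int)) :=
  vs.foldl (fun ix v => ix.modify v [] (fun l => l ++ [t])) index

-- the initial build loop of B: factors set plus variable→scopes index
def pyB_build (factor_scopes : List (List Int)) :
    PySem.Set (List Int) × PySem.Dict Int (List (List Int)) :=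
  factor_scopes.foldl (fun st t =>
    if !t.isEmpty && !(PySem.Set.contains st.1 t) then
      (PySem.Set.add st.1 t, pyB_index_add st.2 t (PySem.Set.ofList t))
    else st) ([], PySem.Dict.empty)

-- one iteration of B's `for var in order` loop; state = (factors, index, work)
def pyB_step (st : PySem.Set (List Int) × PySem.Dict Int (List (List Int)) × Int) (var : Int) :
    PySem.Set (List Int) × PySem.Dict Int (List (List Int)) × Int :=
  let factors := st.1
  let index := st.2.1
  let work := st.2.2
  let bucket : PySem.Set (List Int) :=
    PySem.Set.ofList ((index.getD var []).filter (fun t => PySem.Set.contains factors t))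
  if bucket.isEmpty then (factors, index, work + 1)
  else
    let factors1 := PySem.Set.diff factors bucket
    let union : PySem.Set Int := PySem.Set.ofList (bucket.flatMap (fun s => s))
    let work1 := work + bucket.length * (2 : Int) ^ union.length
    let union1 := PySem.Set.discard union var
    if union1.isEmpty then (factors1, index, work1)
    else
      let new_scope := PySem.List.sorted union1 (fun x => x) false
      if PySem.Set.contains factors1 new_scope then (factors1, index, work1)
      else (PySem.Set.add factors1 new_scope, pyB_index_add index new_scope new_scope, work1)

def estimate_factor_table_elimination_work_py_alt (factor_scopes : List (List Int)) (order : List Int) : Int :=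
  let st := pyB_build factor_scopes
  (order.foldl pyB_step (st.1, st.2, 0)).2.2

-- ===== PRECONDITION & SPEC =====
def Spec_estimate_factor_table_elimination_work_py (factor_scopes : List (List Int)) (order : List Int) (out : Int) : Prop := out = estimate_factor_table_elimination_work_py_alt factor_scopes order
instance (factor_scopes : List (List Int)) (order : List Int) (out : Int) : Decidable (Spec_estimate_factor_table_elimination_work_py factor_scopes order out) := by unfold Spec_estimate_factor_table_elimination_work_py; infer_instance

-- ===== CLAIM (what is proved, stated in full; the proofs are below) =====
def Claim_equal_estimate_factor_table_elimination_work_py : Prop := ∀ (factor_scopes : List (List Int)) (order : List Int), Dom_estimate_factor_table_elimination_work_py factor_scopes order → Spec_estimate_factor_table_elimination_work_py factor_scopes order (estimate_factor_table_elimination_work_py factor_scopes order)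

-- ===== LEMMAS AND PROOFS =====

-- index completeness: every live factor is indexed under each of its variables
def IdxC (factors : List (List Int)) (index : PySem.Dict Int (List (List Int))) : Prop :=
  ∀ t ∈ factors, ∀ v ∈ t, t ∈ index.getD v []
-- index soundness: an indexed scope really contains the key variable
def IdxS (index : PySem.Dict Int (List (List Int))) : Prop :=
  ∀ v t, t ∈ index.getD v [] → v ∈ t

lemma index_add_cons (index : PySem.Dict Int (List (List Int))) (t : List Int) (w : Int)
    (ws : List Int) :
    pyB_index_add index t (w :: ws) =
      pyB_index_add (index.modify w [] (fun l => l ++ [t])) t ws := rfl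

lemma mem_index_add_of_mem (index : PySem.Dict Int (List (List Int))) (t x : List Int)
    (vs : List Int) (v : Int) (h : x ∈ index.getD v []) :
    x ∈ (pyB_index_add index t vs).getD v [] := by
  induction vs generalizing index with
  | nil => exact h
  | cons w ws ih =>
    rw [index_add_cons]
    apply ih
    rw [PySem.Dict.getD_modify]
    split_ifs with hv
    · subst hv; exact List.mem_append_left _ h
    · exact h

lemma mem_index_add_self (index : PySem.Dict Int (List (List Int))) (t : List Int)
    (vs : List Int) (v : Int) (h : v ∈ vs) :
    t ∈ (pyB_index_add index t vs).getD v [] := by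
  induction vs generalizing index with
  | nil => cases h
  | cons w ws ih =>
    rw [index_add_cons]
    rcases List.mem_cons.1 h with rfl | h'
    · apply mem_index_add_of_mem
      rw [PySem.Dict.getD_modify]
      simp
    · exact ih _ h'

lemma mem_of_mem_index_add (index : PySem.Dict Int (List (List Int))) (t x : List Int)
    (vs : List Int) (v : Int) (h : x ∈ (pyB_index_add index t vs).getD v []) :
    x ∈ index.getD v [] ∨ (x = t ∧ v ∈ vs) := by
  induction vs generalizing index with
  | nil => exact Or.inl h
  | cons w ws ih =>
    rw [index_add_cons] at h
    rcases ih _ h with h' | h'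
    · rw [PySem.Dict.getD_modify] at h'
      split_ifs at h' with hv
      · subst hv
        rcases List.mem_append.1 h' with h'' | h''
        · exact Or.inl h''
        · exact Or.inr ⟨List.mem_singleton.1 h'', List.mem_cons_self⟩
      · exact Or.inl h'
    · exact Or.inr ⟨h'.1, List.mem_cons_of_mem _ h'.2⟩

-- A's removal loop is a filter
lemma foldl_discard_eq_filter (bs : List (List Int)) (s : List (List Int)) :
    bs.foldl (fun f x => PySem.Set.discard f x) s = s.filter (fun x => !bs.contains x) := by
  induction bs generalizing s with
  | nil => simp
  | cons b bs ih =>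
    rw [List.foldl_cons, ih, PySem.Set.discard, List.filter_filter]
    apply List.filter_congr
    intro x _
    by_cases hxb : x = b
    · subst hxb; simp
    · simp [hxb]

-- the key step lemma: from equal factors and an index satisfying both invariants,
-- one loop iteration of A and of B produce equal factors, equal work, and the invariants again
lemma step_eq (factors : List (List Int)) (index : PySem.Dict Int (List (List Int)))
    (work : Int) (var : Int) (hnd : factors.Nodup) (hc : IdxC factors index) (hs : IdxS index) :
    (pyB_step (factors, index, work) var).1 = (pyA_step (factors, work) var).1 ∧
    (pyB_step (factors, index, work) var).2.2 = (pyA_step (factors, work) var).2 ∧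
    (pyB_step (factors, index, work) var).1.Nodup ∧
    IdxC (pyB_step (factors, index, work) var).1 (pyB_step (factors, index, work) var).2.1 ∧
    IdxS (pyB_step (factors, index, work) var).2.1 := by
  simp only [pyB_step, pyA_step]
  set bucketA := factors.filter (fun s => s.contains var) with hbA
  set bucketB : PySem.Set (List Int) :=
    PySem.Set.ofList ((index.getD var []).filter (fun t => PySem.Set.contains factors t)) with hbB
  have hmemA : ∀ x : List Int, x ∈ bucketA ↔ x ∈ factors ∧ var ∈ x := by
    intro x; simp [hbA, List.mem_filter]
  have hmemB : ∀ x : List Int, x ∈ bucketB ↔ x ∈ factors ∧ var ∈ x := by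
    intro x
    rw [hbB, PySem.Set.mem_ofList, List.mem_filter]
    constructor
    · rintro ⟨hi, hf⟩
      rw [PySem.Set.contains_iff] at hf
      exact ⟨hf, hs var x hi⟩
    · rintro ⟨hf, hv⟩
      exact ⟨hc x hf var hv, by rw [PySem.Set.contains_iff]; exact hf⟩
  have hndA : bucketA.Nodup := hnd.filter _
  have hndB : bucketB.Nodup := PySem.Set.nodup_ofList _
  have hperm : bucketB.Perm bucketA :=
    (List.perm_ext_iff_of_nodup hndB hndA).2 (fun x => by rw [hmemA, hmemB])
  have hlen : bucketB.length = bucketA.length := hperm.length_eq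
  have hempty : bucketB.isEmpty = bucketA.isEmpty := by
    rw [Bool.eq_iff_iff, List.isEmpty_iff, List.isEmpty_iff]
    constructor
    · intro h; rw [h] at hperm; exact hperm.symm.eq_nil
    · intro h; rw [h] at hperm; exact hperm.eq_nil
  rw [hempty]
  by_cases hE : bucketA.isEmpty = true
  · simp only [hE, if_true]
    exact ⟨trivial, trivial, hnd, hc, hs⟩
  · simp only [hE, if_false, Bool.false_eq_true]
    -- the surviving factor lists are the same filter
    have hf1 : PySem.Set.diff factors bucketB =
        bucketA.foldl (fun f s => PySem.Set.discard f s) factors := by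
      rw [foldl_discard_eq_filter, PySem.Set.diff]
      apply List.filter_congr
      intro x _
      congr 1
      rw [Bool.eq_iff_iff]
      simp [hperm.mem_iff]
    set factors1 := bucketA.foldl (fun f s => PySem.Set.discard f s) factors with hf1A
    have hnd1 : factors1.Nodup := by
      rw [hf1A, foldl_discard_eq_filter]; exact hnd.filter _
    have hsub1 : ∀ x, x ∈ factors1 → x ∈ factors := by
      intro x hx
      rw [hf1A, foldl_discard_eq_filter] at hx
      exact (List.mem_filter.1 hx).1
    -- the union sets agree
    set uA : List Int := PySem.List.sorted (PySem.Set.ofList (bucketA.flatMap (fun s => s)))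
      (fun x => x) false with huA
    set uB : PySem.Set Int := PySem.Set.ofList (bucketB.flatMap (fun s => s)) with huB
    have hUmem : ∀ x : Int, x ∈ uB ↔ x ∈ uA := by
      intro x
      rw [huA, huB, PySem.List.mem_sorted, PySem.Set.mem_ofList, PySem.Set.mem_ofList]
      simp only [List.mem_flatMap]
      constructor
      · rintro ⟨t, ht, hx⟩; exact ⟨t, hperm.mem_iff.1 ht, hx⟩
      · rintro ⟨t, ht, hx⟩; exact ⟨t, hperm.mem_iff.2 ht, hx⟩
    have hUlen : uB.length = uA.length := by
      have h1 : uA.length = (PySem.Set.ofList (bucketA.flatMap (fun s => s))).length := by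
        rw [huA, PySem.List.length_sorted]
      rw [h1]
      exact ((List.perm_ext_iff_of_nodup (PySem.Set.nodup_ofList _) (PySem.Set.nodup_ofList _)).2
        (fun x => by
          have := hUmem x
          rw [huA, PySem.List.mem_sorted] at this
          exact this)).length_eq
    rw [hf1, hlen, hUlen]
    -- the new scopes agree
    set ns := uA.filter (fun vertex => vertex != var) with hns
    set u1 := PySem.Set.discard uB var with hu1
    have hnsmem : ∀ x : Int, x ∈ ns ↔ x ∈ u1 := by
      intro x
      rw [hns, hu1, List.mem_filter, PySem.Set.mem_discard, ← hUmem]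
      simp
    have hnslt : List.Pairwise (fun a b : Int => a < b) ns := by
      rw [hns, huA]
      exact List.Pairwise.filter _ (PySem.List.sorted_ofList_pairwise_lt _)
    have hnsnd : ns.Nodup := hnslt.imp (fun h => ne_of_lt h)
    have hu1nd : u1.Nodup := PySem.Set.nodup_discard _ _ (PySem.Set.nodup_ofList _)
    have hnse : ns.isEmpty = u1.isEmpty := by
      rcases h1 : u1 with _ | ⟨a, as⟩
      · have : ns = [] := List.eq_nil_iff_forall_not_mem.2 (fun x hx => by
          have := (hnsmem x).1 hx; rw [h1] at this; cases this)
        simp [this]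
      · have ha : a ∈ ns := (hnsmem a).2 (by rw [h1]; exact List.mem_cons_self)
        rcases h2 : ns with _ | _
        · rw [h2] at ha; cases ha
        · simp
    rw [hnse]
    by_cases hE2 : u1.isEmpty = true
    · simp only [hE2, if_true]
      refine ⟨trivial, trivial, hnd1, ?_, hs⟩
      intro t ht v hv
      exact hc t (hsub1 t ht) v hv
    · simp only [hE2, if_false, Bool.false_eq_true]
      have hsorted : PySem.List.sorted u1 (fun x => x) false = ns := by
        apply PySem.List.sorted_eq_of_perm_of_pairwise_lt
        · exact (List.perm_ext_iff_of_nodup hnsnd hu1nd).2 hnsmem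
        · exact hnslt
      rw [hsorted, PySem.Set.add_eq_ite]
      by_cases hcon : PySem.Set.contains factors1 ns = true
      · have hmem : ns ∈ factors1 := (PySem.Set.contains_iff _ _).1 hcon
        simp only [hcon, if_true, hmem, if_true]
        refine ⟨trivial, trivial, hnd1, ?_, hs⟩
        intro t ht v hv
        exact hc t (hsub1 t ht) v hv
      · have hmem : ns ∉ factors1 := fun h =>
          hcon ((PySem.Set.contains_iff _ _).2 h)
        simp only [hcon, if_false, hmem, if_false, Bool.false_eq_true]
        refine ⟨trivial, trivial, ?_, ?_, ?_⟩
        · rw [← PySem.Set.add_of_not_mem hmem]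
          exact PySem.Set.nodup_add _ _ hnd1
        · intro t ht v hv
          rcases List.mem_append.1 ht with ht' | ht'
          · exact mem_index_add_of_mem _ _ _ _ _ (hc t (hsub1 t ht') v hv)
          · rw [List.mem_singleton] at ht'
            subst ht'
            exact mem_index_add_self _ _ _ _ hv
        · intro v t ht
          rcases mem_of_mem_index_add _ _ _ _ _ ht with h' | ⟨rfl, hv⟩
          · exact hs v t h'
          · exact hv

-- the generalized build loop
lemma build_loop (l : List (List Int)) (s : List (List Int))
    (ix : PySem.Dict Int (List (List Int)))
    (hnd : s.Nodup) (hc : IdxC s ix) (hsx : IdxS ix) :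
    (l.foldl (fun st t =>
        if !t.isEmpty && !(PySem.Set.contains st.1 t) then
          (PySem.Set.add st.1 t, pyB_index_add st.2 t (PySem.Set.ofList t))
        else st) (s, ix)).1 =
      (l.filter (fun t => !t.isEmpty)).foldl PySem.Set.add s ∧
    (l.foldl (fun st t =>
        if !t.isEmpty && !(PySem.Set.contains st.1 t) then
          (PySem.Set.add st.1 t, pyB_index_add st.2 t (PySem.Set.ofList t))
        else st) (s, ix)).1.Nodup ∧
    IdxC (l.foldl (fun st t =>
        if !t.isEmpty && !(PySem.Set.contains st.1 t) then
          (PySem.Set.add st.1 t, pyB_index_add st.2 t (PySem.Set.ofList t))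
        else st) (s, ix)).1
      (l.foldl (fun st t =>
        if !t.isEmpty && !(PySem.Set.contains st.1 t) then
          (PySem.Set.add st.1 t, pyB_index_add st.2 t (PySem.Set.ofList t))
        else st) (s, ix)).2 ∧
    IdxS (l.foldl (fun st t =>
        if !t.isEmpty && !(PySem.Set.contains st.1 t) then
          (PySem.Set.add st.1 t, pyB_index_add st.2 t (PySem.Set.ofList t))
        else st) (s, ix)).2 := by
  induction l generalizing s ix with
  | nil => exact ⟨rfl, hnd, hc, hsx⟩
  | cons t l ih =>
    rw [List.foldl_cons, List.filter_cons]
    by_cases hEm : t.isEmpty = true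
    · simp only [hEm, Bool.not_true, Bool.false_and, if_false, Bool.false_eq_true]
      exact ih s ix hnd hc hsx
    · by_cases hcon : PySem.Set.contains s t = true
      · have hmem : t ∈ s := (PySem.Set.contains_iff _ _).1 hcon
        simp only [hEm, hcon, Bool.not_false, Bool.not_true, Bool.and_false, if_false,
          Bool.false_eq_true, if_true, List.foldl_cons, PySem.Set.add_of_mem hmem]
        exact ih s ix hnd hc hsx
      · have hmem : t ∉ s := fun h => hcon ((PySem.Set.contains_iff _ _).2 h)
        simp only [hEm, hcon, Bool.not_false, Bool.and_true, if_true, List.foldl_cons]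
        apply ih
        · exact PySem.Set.nodup_add _ _ hnd
        · intro x hx v hv
          rw [PySem.Set.mem_add] at hx
          rcases hx with hx | rfl
          · exact mem_index_add_of_mem _ _ _ _ _ (hc x hx v hv)
          · exact mem_index_add_self _ _ _ _ ((PySem.Set.mem_ofList _ _).2 hv)
        · intro v x hx
          rcases mem_of_mem_index_add _ _ _ _ _ hx with h' | ⟨rfl, hv⟩
          · exact hsx v x h'
          · exact (PySem.Set.mem_ofList _ _).1 hv

-- the build loop: B's initial factors equal A's, and the invariants hold
lemma build_eq (factor_scopes : List (List Int)) :
    (pyB_build factor_scopes).1 = PySem.Set.ofList (factor_scopes.filter (fun s => !s.isEmpty)) ∧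
    (pyB_build factor_scopes).1.Nodup ∧
    IdxC (pyB_build factor_scopes).1 (pyB_build factor_scopes).2 ∧
    IdxS (pyB_build factor_scopes).2 := by
  obtain ⟨h1, h2, h3, h4⟩ := build_loop factor_scopes [] PySem.Dict.empty List.nodup_nil
    (fun t ht => absurd ht (List.not_mem_nil (a := t)))
    (fun v t ht => by rw [PySem.Dict.getD_empty] at ht; cases ht)
  refine ⟨?_, h2, h3, h4⟩
  rw [pyB_build, h1, PySem.Set.ofList_eq_foldl]

lemma loop_eq (order : List Int) (factors : List (List Int))
    (index : PySem.Dict Int (List (List Int))) (work : Int)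
    (hnd : factors.Nodup) (hc : IdxC factors index) (hs : IdxS index) :
    (order.foldl pyB_step (factors, index, work)).2.2 =
      (order.foldl pyA_step (factors, work)).2 := by
  induction order generalizing factors index work with
  | nil => rfl
  | cons var rest ih =>
    obtain ⟨h1, h2, h3, h4, h5⟩ := step_eq factors index work var hnd hc hs
    have hsplit : (pyB_step (factors, index, work) var) =
        ((pyA_step (factors, work) var).1, (pyB_step (factors, index, work) var).2.1,
          (pyA_step (factors, work) var).2) := by
      rw [← h1, ← h2]
    rw [h1] at h3
    rw [h1] at h4
    simp only [List.foldl_cons]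
    rw [hsplit]
    exact ih _ _ _ h3 h4 h5

-- ===== VERDICT (by name: the statement is the Claim_ definition above) =====
theorem estimate_factor_table_elimination_work_py_spec : Claim_equal_estimate_factor_table_elimination_work_py := by
  intro factor_scopes order _
  unfold Spec_estimate_factor_table_elimination_work_py
  unfold estimate_factor_table_elimination_work_py estimate_factor_table_elimination_work_py_alt
  obtain ⟨h1, h2, h3, h4⟩ := build_eq factor_scopes
  rw [loop_eq order _ _ 0 h2 h3 h4, h1]
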